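-- pv_equiv track=rewrite | github.com/haram22/Baekjoon_ram | 프로그래머스/0/181829. 이차원 배열 대각선 순회하기/이차원 배열 대각선 순회하기.py | solution
-- ===== SOURCE A (Python) =====
-- def solution(board, k):
--     answer = 0
--     value_sum = 0
--     # k보다 합이 작은 것들 찾기
--     # 찾으면 정답 변수에 더해주기
--     for i in range(len(board)) :
--         value_sum = 0
--         for j in range(len(board[i])) :
--             if (i+j <= k) :
--                 answer += board[i][j]
--     return answer
-- ===== SOURCE B (Python) =====
-- def solution(board, k):
--     # Traverse by anti-diagonals d = i + j instead of rows: every cell with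
--     # i + j <= k lies on some diagonal d in 0..min(k, max possible i+j).
--     m = max((len(r) for r in board), default=0)
--     dmax = min(k, len(board) - 1 + m - 1)
--     total = 0
--     for d in range(dmax + 1):
--         for i in range(len(board)):
--             j = d - i
--             if 0 <= j < len(board[i]):
--                 total += board[i][j]
--     return total
-- ===== Notes on version B (the rewrite author's own statement) =====
-- stated objective: alternative
-- what changed: B sums the board by anti-diagonals: it computes the last relevant diagonal dmax = min(k, len(board)-1 + max row length - 1) and, for each diagonal d from 0 to dmax, adds board[i][d-i] for every row i where that column exists, instead of A's row-by-row scan testing i+j<=k on every cell.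
import Mathlib
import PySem

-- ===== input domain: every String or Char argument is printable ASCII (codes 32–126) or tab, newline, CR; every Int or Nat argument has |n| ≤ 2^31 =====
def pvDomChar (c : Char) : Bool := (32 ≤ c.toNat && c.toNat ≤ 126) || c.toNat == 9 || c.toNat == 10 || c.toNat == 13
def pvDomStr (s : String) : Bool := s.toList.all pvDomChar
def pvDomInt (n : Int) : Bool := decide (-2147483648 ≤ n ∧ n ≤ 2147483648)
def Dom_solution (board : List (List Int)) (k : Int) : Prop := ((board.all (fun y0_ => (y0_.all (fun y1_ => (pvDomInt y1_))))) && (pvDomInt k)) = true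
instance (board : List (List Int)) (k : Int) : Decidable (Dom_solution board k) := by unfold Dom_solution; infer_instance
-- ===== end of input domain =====

-- B traverses the board by anti-diagonals d = i + j (d from 0 to min(k, max diagonal)) instead of A's row-by-row scan with a per-cell i+j<=k test.


-- ===== PORT A =====
-- A's 'value_sum' is assigned but never read (dead code); it is not ported.
def solution (board : List (List Int)) (k : Int) : Int :=
  (PySem.List.pyRange 0 (PySem.List.len board) 1).foldl (fun answer i =>
    (PySem.List.pyRange 0 (PySem.List.len (PySem.List.pyGetD board i [])) 1).foldl
      (fun answer j =>
        if i + j ≤ k then answer + PySem.List.pyGetD (PySem.List.pyGetD board i []) j 0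
        else answer)
      answer) 0

-- ===== PORT B =====
-- m = max((len(r) for r in board), default=0)
def pvMaxLen (board : List (List Int)) : Int :=
  match PySem.List.max? (board.map (fun r => ((r.length : Int)))) (fun x => x) with
  | some v => v
  | none => 0

def solution_alt (board : List (List Int)) (k : Int) : Int :=
  let m := pvMaxLen board
  let dmax := min k ((board.length : Int) - 1 + m - 1)
  (PySem.List.pyRange 0 (dmax + 1) 1).foldl (fun total d =>
    (PySem.List.pyRange 0 (PySem.List.len board) 1).foldl (fun total i =>
      let j := d - i
      if 0 ≤ j ∧ j < PySem.List.len (PySem.List.pyGetD board i [])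
      then total + PySem.List.pyGetD (PySem.List.pyGetD board i []) j 0
      else total) total) 0

-- ===== PRECONDITION & SPEC =====
def Spec_solution (board : List (List Int)) (k : Int) (out : Int) : Prop := out = solution_alt board k
instance (board : List (List Int)) (k : Int) (out : Int) : Decidable (Spec_solution board k out) := by unfold Spec_solution; infer_instance

-- ===== CLAIM (what is proved, stated in full; the proofs are below) =====
def Claim_equal_solution : Prop := ∀ (board : List (List Int)) (k : Int), Dom_solution board k → Spec_solution board k (solution board k)

-- ===== LEMMAS AND PROOFS =====

-- number of diagonals B visits
def pvD (board : List (List Int)) (k : Int) : Nat :=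
  (min k ((board.length : Int) - 1 + pvMaxLen board - 1) + 1).toNat

-- 'answer += v if p else skip' loop as a sum of an if-then-else map
lemma foldl_if_add {α : Type} (l : List α) (P : α → Prop) [DecidablePred P]
    (f : α → Int) (acc : Int) :
    l.foldl (fun a x => if P x then a + f x else a) acc
      = acc + (l.map (fun x => if P x then f x else 0)).sum := by
  rw [PySem.List.foldl_congr_mem l _ (fun a x => a + (if P x then f x else 0)) acc
    (by intro a x _; by_cases h : P x <;> simp [h]), PySem.List.foldl_add]

-- A as a double Finset sum over (row, column)
lemma A_sum (board : List (List Int)) (k : Int) :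
    solution board k
      = ∑ i ∈ Finset.range board.length, ∑ j ∈ Finset.range (board.getD i []).length,
          (if (i : Int) + (j : Int) ≤ k then (board.getD i []).getD j 0 else 0) := by
  unfold solution
  simp only [PySem.List.len_eq, PySem.List.pyGetD_natCast, PySem.List.pyRange_one,
    sub_zero, Int.toNat_natCast, zero_add, List.foldl_map]
  rw [PySem.List.foldl_congr_mem _ _
    (fun (ans : Int) (i : Nat) => ans + ∑ j ∈ Finset.range (board.getD i []).length,
      (if (i : Int) + (j : Int) ≤ k then (board.getD i []).getD j 0 else 0)) 0
    (by
      intro a i _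
      rw [foldl_if_add]
      rfl),
    PySem.List.foldl_add, zero_add]
  rfl

-- B as a double Finset sum over (diagonal, row)
lemma B_sum (board : List (List Int)) (k : Int) :
    solution_alt board k
      = ∑ d ∈ Finset.range (pvD board k), ∑ i ∈ Finset.range board.length,
          (if (0 : Int) ≤ (d : Int) - (i : Int) ∧ (d : Int) - (i : Int) < ((board.getD i []).length : Int)
           then PySem.List.pyGetD (board.getD i []) ((d : Int) - (i : Int)) 0 else 0) := by
  unfold solution_alt pvD
  simp only [PySem.List.len_eq, PySem.List.pyGetD_natCast, PySem.List.pyRange_one,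
    sub_zero, Int.toNat_natCast, zero_add, List.foldl_map]
  rw [PySem.List.foldl_congr_mem _ _
    (fun (tot : Int) (d : Nat) => tot + ∑ i ∈ Finset.range board.length,
      (if (0 : Int) ≤ (d : Int) - (i : Int) ∧ (d : Int) - (i : Int) < ((board.getD i []).length : Int)
       then PySem.List.pyGetD (board.getD i []) ((d : Int) - (i : Int)) 0 else 0)) 0
    (by
      intro a d _
      rw [foldl_if_add]
      rfl),
    PySem.List.foldl_add, zero_add]
  rfl

-- every row is at most the maximal row length
lemma maxlen_ge (board : List (List Int)) (i : Nat) (hi : i < board.length) :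
    ((board.getD i []).length : Int) ≤ pvMaxLen board := by
  unfold pvMaxLen
  cases hm : PySem.List.max? (board.map (fun r => ((r.length : Int)))) (fun x => x) with
  | none =>
    rw [PySem.List.max?_eq_none_iff, List.map_eq_nil_iff] at hm
    subst hm; simp at hi
  | some v =>
    exact PySem.List.max?_isMax hm _ (List.mem_map.mpr
      ⟨board.getD i [], by rw [List.getD_eq_getElem board [] hi]; exact List.getElem_mem hi, rfl⟩)

-- ∑ over a range of an if-guarded prefix
lemma sum_range_if_lt (D M : Nat) (F : Nat → Int) :
    ∑ x ∈ Finset.range D, (if x < M then F x else 0) = ∑ x ∈ Finset.range (min D M), F x := by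
  induction D with
  | zero => simp
  | succ D ih =>
    rw [Finset.sum_range_succ, ih]
    by_cases h : D < M
    · rw [if_pos h]
      have h1 : min (D + 1) M = (min D M) + 1 := by omega
      have h2 : min D M = D := by omega
      rw [h1, h2, Finset.sum_range_succ]
    · rw [if_neg h]
      have : min (D + 1) M = min D M := by omega
      rw [this, add_zero]

-- shift the summation index: d runs over [i, D), j = d - i over [0, D - i)
lemma sum_range_shift (i D : Nat) (G : Nat → Int) :
    ∑ d ∈ Finset.range D, (if i ≤ d then G (d - i) else 0)
      = ∑ j ∈ Finset.range (D - i), G j := by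
  rw [← Finset.sum_filter]
  have hset : (Finset.range D).filter (fun d => i ≤ d) = Finset.Ico i D := by
    ext d
    simp [Finset.mem_filter, Finset.mem_Ico]
    omega
  rw [hset, Finset.sum_Ico_eq_sum_range]
  exact Finset.sum_congr rfl (fun j _ => by rw [Nat.add_sub_cancel_left])

-- for each row i, B's sum over diagonals equals A's sum over columns
lemma per_row (board : List (List Int)) (k : Int) (i : Nat) (hi : i < board.length) :
    ∑ d ∈ Finset.range (pvD board k),
        (if (0 : Int) ≤ (d : Int) - (i : Int) ∧ (d : Int) - (i : Int) < ((board.getD i []).length : Int)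
         then PySem.List.pyGetD (board.getD i []) ((d : Int) - (i : Int)) 0 else 0)
      = ∑ j ∈ Finset.range (board.getD i []).length,
          (if (i : Int) + (j : Int) ≤ k then (board.getD i []).getD j 0 else 0) := by
  set row := board.getD i [] with hrow
  set L := row.length with hL
  have hml : (L : Int) ≤ pvMaxLen board := maxlen_ge board i hi
  -- rewrite B's summand into a nested Nat-indexed if
  have hsummand : ∀ d : Nat,
      (if (0 : Int) ≤ (d : Int) - (i : Int) ∧ (d : Int) - (i : Int) < (L : Int)
       then PySem.List.pyGetD row ((d : Int) - (i : Int)) 0 else 0)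
        = (if i ≤ d then (if d - i < L then row.getD (d - i) 0 else 0) else 0) := by
    intro d
    by_cases h1 : i ≤ d
    · by_cases h2 : d - i < L
      · have hc : (0 : Int) ≤ (d : Int) - (i : Int) ∧ (d : Int) - (i : Int) < (L : Int) := by
          constructor <;> omega
        rw [if_pos hc, if_pos h1, if_pos h2, PySem.List.pyGetD_of_nonneg _ _ hc.1]
        congr 1
        omega
      · rw [if_neg (by omega), if_pos h1, if_neg h2]
    · rw [if_neg (by omega), if_neg h1]
  rw [Finset.sum_congr rfl (fun d _ => hsummand d),
    sum_range_shift i (pvD board k) (fun j => if j < L then row.getD j 0 else 0),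
    sum_range_if_lt]
  -- rewrite A's summand: for j < L, i + j ≤ k iff the diagonal i + j is visited
  have hcond : ∀ j ∈ Finset.range L,
      (if (i : Int) + (j : Int) ≤ k then row.getD j 0 else 0)
        = (if j < pvD board k - i then row.getD j 0 else 0) := by
    intro j hj
    have hjL : j < L := Finset.mem_range.mp hj
    have hcle : (i : Int) + (j : Int) ≤ (board.length : Int) - 1 + pvMaxLen board - 1 := by omega
    have hiff : ((i : Int) + (j : Int) ≤ k) ↔ j < pvD board k - i := by
      unfold pvD
      have h1 : ((i : Int) + (j : Int) ≤ min k ((board.length : Int) - 1 + pvMaxLen board - 1))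
          ↔ ((i : Int) + (j : Int) ≤ k) :=
        ⟨fun h => (le_min_iff.mp h).1, fun h => le_min_iff.mpr ⟨h, hcle⟩⟩
      rw [← h1]
      generalize min k ((board.length : Int) - 1 + pvMaxLen board - 1) = dm
      omega
    split_ifs with ha hb hb
    · rfl
    · exact absurd (hiff.mp ha) hb
    · exact absurd (hiff.mpr hb) ha
    · rfl
  rw [Finset.sum_congr rfl hcond, sum_range_if_lt, min_comm]

theorem solution_eq (board : List (List Int)) (k : Int) :
    solution board k = solution_alt board k := by
  rw [A_sum, B_sum, Finset.sum_comm]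
  exact Finset.sum_congr rfl (fun i hi => (per_row board k i (Finset.mem_range.mp hi)).symm)

-- ===== VERDICT (by name: the statement is the Claim_ definition above) =====
theorem solution_spec : Claim_equal_solution := by
  intro board k _
  exact solution_eq board k
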